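-- pv_equiv track=rewrite | github.com/niuniudevp/WesternBlot_Image_From_Raw_Tif | bound_detect.py | get_peaks_troughs
-- ===== SOURCE A (Python) =====
-- def get_peaks_troughs(h, rangesize):
--     peaks = list()
--     troughs = list()
--     S = 0
--     for x in range(1, len(h) - 1):
--         if S == 0:
--             if h[x] > h[x + 1]:
--                 S = 1  # # down
--             else:
--                 S = 2  # # up
--         elif S == 1:
--             if h[x] < h[x + 1]:
--                 S = 2
--                 # # from down to up
--                 if len(troughs):
--                     # # check if need merge
--                     (prev_x, prev_trough) = troughs[-1]
--                     if x - prev_x < rangesize: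
--                         if prev_trough > h[x]:
--                             troughs[-1] = (x, h[x])
--                     else:
--                         troughs.append((x, h[x]))
--                 else:
--                     troughs.append((x, h[x]))
--         elif S == 2:
--             if h[x] > h[x + 1]:
--                 S = 1
--                 # # from up to down
--                 if len(peaks):
--                     prev_x, prev_peak = peaks[-1]
--                     if x - prev_x < rangesize:
--                         if prev_peak < h[x]:
--                             peaks[-1] = (x, h[x])
--                     else:
--                         peaks.append((x, h[x]))
--                 else:
--                     peaks.append((x, h[x]))
--     return peaks, troughs
-- ===== SOURCE B (Python) =====
-- def get_peaks_troughs(h, rangesize):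
--     # pass 1: detect raw direction-flip events
--     raw_peaks, raw_troughs = [], []
--     S = 0
--     for x in range(1, len(h) - 1):
--         if S == 0:
--             S = 1 if h[x] > h[x + 1] else 2
--         elif S == 1 and h[x] < h[x + 1]:
--             S = 2
--             raw_troughs.append((x, h[x]))
--         elif S == 2 and h[x] > h[x + 1]:
--             S = 1
--             raw_peaks.append((x, h[x]))
--     # pass 2: merge nearby same-type events, keeping the more extreme one
--     def merge(raw, better):
--         out = []
--         for (x, v) in raw:
--             if not out:
--                 out.append((x, v))
--             else:
--                 px, pv = out[-1]
--                 if x - px < rangesize: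
--                     if better(v, pv):
--                         out[-1] = (x, v)
--                 else:
--                     out.append((x, v))
--         return out
--     return merge(raw_peaks, lambda v, pv: pv < v), merge(raw_troughs, lambda v, pv: pv > v)
-- ===== Notes on version B (the rewrite author's own statement) =====
-- stated objective: alternative
-- what changed: A interleaves flip detection and range-merging inside one stateful loop with duplicated peak/trough merge code; B separates them into a detection pass producing raw flip events and a single shared merge fold parametrized by the comparison.
import Mathlib
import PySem

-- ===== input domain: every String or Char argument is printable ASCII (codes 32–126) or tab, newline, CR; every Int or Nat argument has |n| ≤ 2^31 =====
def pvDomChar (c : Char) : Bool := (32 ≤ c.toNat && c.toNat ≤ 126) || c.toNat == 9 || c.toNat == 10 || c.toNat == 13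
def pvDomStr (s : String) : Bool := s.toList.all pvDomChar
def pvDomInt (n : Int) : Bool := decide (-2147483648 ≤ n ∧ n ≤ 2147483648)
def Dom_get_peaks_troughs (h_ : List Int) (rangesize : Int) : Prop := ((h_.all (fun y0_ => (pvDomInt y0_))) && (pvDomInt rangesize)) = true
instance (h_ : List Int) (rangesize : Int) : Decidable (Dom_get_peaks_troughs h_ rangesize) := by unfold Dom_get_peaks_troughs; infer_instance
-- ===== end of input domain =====

-- B separates A's single stateful loop into a detection pass (raw flip events) and one shared
-- merge fold parametrized by the comparison; objective: alternative decomposition, same cost.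


-- h[x] for the indices the loops use (always 0 ≤ x < len h, so the default is never taken)
def pvIdx (h : List Int) (x : Int) : Int := (PySem.List.pyGet? h x).getD 0

-- ===== PORT A =====
-- loop body of A: state (S, peaks, troughs); merging happens in place at each flip
def pvStepA (rs : Int) (h : List Int)
    (st : Int × List (Int × Int) × List (Int × Int)) (x : Int) :
    Int × List (Int × Int) × List (Int × Int) :=
  let S := st.1; let pks := st.2.1; let trs := st.2.2
  if S = 0 then
    (if pvIdx h x > pvIdx h (x+1) then 1 else 2, pks, trs)
  else if S = 1 then
    if pvIdx h x < pvIdx h (x+1) then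
      (2, pks,
        if trs.length ≠ 0 then
          if x - (trs.getLastD (0,0)).1 < rs then
            (if (trs.getLastD (0,0)).2 > pvIdx h x then trs.dropLast ++ [(x, pvIdx h x)] else trs)
          else trs ++ [(x, pvIdx h x)]
        else trs ++ [(x, pvIdx h x)])
    else st
  else if S = 2 then
    if pvIdx h x > pvIdx h (x+1) then
      (1,
        (if pks.length ≠ 0 then
          if x - (pks.getLastD (0,0)).1 < rs then
            (if (pks.getLastD (0,0)).2 < pvIdx h x then pks.dropLast ++ [(x, pvIdx h x)] else pks)
          else pks ++ [(x, pvIdx h x)]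
        else pks ++ [(x, pvIdx h x)]), trs)
    else st
  else st

def get_peaks_troughs (h_ : List Int) (rangesize : Int) : (List (Int × Int)) × (List (Int × Int)) :=
  let r := (PySem.List.pyRange 1 ((h_.length : Int) - 1) 1).foldl (pvStepA rangesize h_) (0, [], [])
  (r.2.1, r.2.2)

-- ===== PORT B =====
-- pass 1: record raw flip events, no merging
def pvDetStep (h : List Int)
    (st : Int × List (Int × Int) × List (Int × Int)) (x : Int) :
    Int × List (Int × Int) × List (Int × Int) :=
  if st.1 = 0 then (if pvIdx h x > pvIdx h (x+1) then 1 else 2, st.2.1, st.2.2)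
  else if st.1 = 1 ∧ pvIdx h x < pvIdx h (x+1) then (2, st.2.1, st.2.2 ++ [(x, pvIdx h x)])
  else if st.1 = 2 ∧ pvIdx h x > pvIdx h (x+1) then (1, st.2.1 ++ [(x, pvIdx h x)], st.2.2)
  else st

-- pass 2: shared merge step, 'better' decides whether the new value replaces the nearby previous one
def pvMergeStep (rs : Int) (better : Int → Int → Bool)
    (acc : List (Int × Int)) (e : Int × Int) : List (Int × Int) :=
  if acc = [] then acc ++ [e]
  else
    if e.1 - (acc.getLastD (0,0)).1 < rs then
      (if better e.2 (acc.getLastD (0,0)).2 then acc.dropLast ++ [e] else acc)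
    else acc ++ [e]

def get_peaks_troughs_alt (h_ : List Int) (rangesize : Int) : (List (Int × Int)) × (List (Int × Int)) :=
  let d := (PySem.List.pyRange 1 ((h_.length : Int) - 1) 1).foldl (pvDetStep h_) (0, [], [])
  (d.2.1.foldl (pvMergeStep rangesize (fun v pv => pv < v)) [],
   d.2.2.foldl (pvMergeStep rangesize (fun v pv => pv > v)) [])

-- ===== PRECONDITION & SPEC =====
def Spec_get_peaks_troughs (h_ : List Int) (rangesize : Int) (out : (List (Int × Int)) × (List (Int × Int))) : Prop := out = get_peaks_troughs_alt h_ rangesize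
instance (h_ : List Int) (rangesize : Int) (out : (List (Int × Int)) × (List (Int × Int))) : Decidable (Spec_get_peaks_troughs h_ rangesize out) := by unfold Spec_get_peaks_troughs; infer_instance

-- ===== CLAIM (what is proved, stated in full; the proofs are below) =====
def Claim_equal_get_peaks_troughs : Prop := ∀ (h_ : List Int) (rangesize : Int), Dom_get_peaks_troughs h_ rangesize → Spec_get_peaks_troughs h_ rangesize (get_peaks_troughs h_ rangesize)

-- ===== LEMMAS AND PROOFS =====

lemma step_eq (rs : Int) (h : List Int) (S x : Int) (rp rt : List (Int × Int)) :
    pvStepA rs h (S, rp.foldl (pvMergeStep rs (fun v pv => pv < v)) [],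
                     rt.foldl (pvMergeStep rs (fun v pv => pv > v)) []) x
    = ((pvDetStep h (S, rp, rt) x).1,
       (pvDetStep h (S, rp, rt) x).2.1.foldl (pvMergeStep rs (fun v pv => pv < v)) [],
       (pvDetStep h (S, rp, rt) x).2.2.foldl (pvMergeStep rs (fun v pv => pv > v)) []) := by
  by_cases h0 : S = 0
  · simp [pvStepA, pvDetStep, h0]
  · by_cases h1 : S = 1
    · by_cases hc : pvIdx h x < pvIdx h (x+1)
      · simp [pvStepA, pvDetStep, h1, hc, List.foldl_append, pvMergeStep, List.getLastD]
      · simp [pvStepA, pvDetStep, h1, hc]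
    · by_cases h2 : S = 2
      · by_cases hc : pvIdx h x > pvIdx h (x+1)
        · simp [pvStepA, pvDetStep, h2, hc, List.foldl_append, pvMergeStep, List.getLastD]
        · simp [pvStepA, pvDetStep, h2, hc]
      · simp [pvStepA, pvDetStep, h0, h1, h2]

lemma loop_eq (rs : Int) (h : List Int) (xs : List Int) :
    ∀ (S : Int) (rp rt : List (Int × Int)),
    xs.foldl (pvStepA rs h) (S, rp.foldl (pvMergeStep rs (fun v pv => pv < v)) [],
                                rt.foldl (pvMergeStep rs (fun v pv => pv > v)) [])
    = ((xs.foldl (pvDetStep h) (S, rp, rt)).1,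
       (xs.foldl (pvDetStep h) (S, rp, rt)).2.1.foldl (pvMergeStep rs (fun v pv => pv < v)) [],
       (xs.foldl (pvDetStep h) (S, rp, rt)).2.2.foldl (pvMergeStep rs (fun v pv => pv > v)) []) := by
  induction xs with
  | nil => intro S rp rt; simp
  | cons x xs ih =>
    intro S rp rt
    simp only [List.foldl_cons]
    rw [step_eq]
    exact ih _ _ _

-- ===== VERDICT (by name: the statement is the Claim_ definition above) =====
theorem get_peaks_troughs_spec : Claim_equal_get_peaks_troughs := by
  intro h_ rangesize _
  unfold Spec_get_peaks_troughs get_peaks_troughs get_peaks_troughs_alt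
  have := loop_eq rangesize h_ (PySem.List.pyRange 1 ((h_.length : Int) - 1) 1) 0 [] []
  simp only [List.foldl_nil] at this
  simp [this]
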